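-- pv_equiv track=rewrite | github.com/vyalsgh-tech/my-timetable-next | tools/step23_mobile_compile_repair.py | remove_known_bad_css
-- ===== SOURCE A (Python) =====
-- def remove_known_bad_css(text: str) -> str:
--     lines = text.splitlines()
--     out = []
--     skip = False
--     skip_reason = ''
--     for line in lines:
--         s = line.strip()
--         if not skip and (('div[data-testid="stButton"]' in line and '{' in line) or ('.mdgo-strike' in line and '{' in line)):
--             skip = True
--             skip_reason = 'css'
--             continue
--         if skip:
--             if s in ('}', '}}') or '</style>' in s or s.endswith('}'):
--                 skip = False
--                 skip_reason = ''
--             continue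
--         bad_tokens = [
--             'white-space: nowrap !important',
--             'word-break: keep-all !important',
--             'min-width:',
--             'padding-left:',
--             'padding-right:',
--             'text-decoration-line:',
--             'text-decoration-thickness:',
--             'text-decoration-color:',
--             'opacity:',
--         ]
--         if any(tok in line for tok in bad_tokens):
--             continue
--         out.append(line)
--     return '\n'.join(out) + '\n'
-- ===== SOURCE B (Python) =====
-- BAD_TOKENS = (
--     'white-space: nowrap !important',
--     'word-break: keep-all !important',
--     'min-width:',
--     'padding-left:',
--     'padding-right:',
--     'text-decoration-line:',
--     'text-decoration-thickness:',
--     'text-decoration-color:',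
--     'opacity:',
-- )
--
--
-- def _is_block_start(line):
--     return '{' in line and ('div[data-testid="stButton"]' in line or '.mdgo-strike' in line)
--
--
-- def _is_block_end(s):
--     # '}' and '}}' both end with '}', so endswith covers A's tuple test
--     return '</style>' in s or s.endswith('}')
--
--
-- def remove_known_bad_css(text: str) -> str:
--     lines = text.splitlines()
--     n = len(lines)
--     out = []
--     i = 0
--     while i < n:
--         line = lines[i]
--         if _is_block_start(line):
--             i += 1
--             while i < n and not _is_block_end(lines[i].strip()):
--                 i += 1
--             i += 1  # drop the closing line too
--             continue
--         if not any(tok in line for tok in BAD_TOKENS):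
--             out.append(line)
--         i += 1
--     return '\n'.join(out) + '\n'
-- ===== Notes on version B (the rewrite author's own statement) =====
-- stated objective: simpler
-- what changed: Replaces the carried skip-boolean/skip_reason state machine with an index-based while loop that, on a block start, runs an inner loop dropping lines up to and including the closing line; the redundant tuple-membership part of the block-end test is absorbed into the endswith check.
import Mathlib
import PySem

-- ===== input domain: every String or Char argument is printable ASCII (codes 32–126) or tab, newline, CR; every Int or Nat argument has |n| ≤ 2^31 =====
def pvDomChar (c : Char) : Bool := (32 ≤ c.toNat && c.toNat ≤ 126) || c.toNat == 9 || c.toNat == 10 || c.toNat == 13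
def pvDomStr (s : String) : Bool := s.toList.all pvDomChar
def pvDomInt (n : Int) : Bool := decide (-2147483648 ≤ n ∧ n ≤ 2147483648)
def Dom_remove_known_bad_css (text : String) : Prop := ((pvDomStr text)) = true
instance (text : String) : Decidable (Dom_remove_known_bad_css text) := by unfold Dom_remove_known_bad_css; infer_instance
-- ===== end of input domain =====

-- B replaces A's carried skip-boolean state machine by an index/while loop with an inner
-- block-skipping loop (objective: simpler decomposition; same asymptotic cost).

-- ===== PORT A =====
-- the bad_tokens list A builds each iteration (constant)
def pvBadTokens : List String :=
  ["white-space: nowrap !important",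
   "word-break: keep-all !important",
   "min-width:",
   "padding-left:",
   "padding-right:",
   "text-decoration-line:",
   "text-decoration-thickness:",
   "text-decoration-color:",
   "opacity:"]

-- loop body of A: state = (out, skip, skip_reason)
def pvAStep (st : List String × Bool × String) (line : String) : List String × Bool × String :=
  let s := PySem.Str.strip line
  if !st.2.1 && ((PySem.Str.isIn "div[data-testid=\"stButton\"]" line && PySem.Str.isIn "{" line)
      || (PySem.Str.isIn ".mdgo-strike" line && PySem.Str.isIn "{" line)) then
    (st.1, true, "css")
  else if st.2.1 then
    (if (s == "}") || (s == "}}") || PySem.Str.isIn "</style>" s || PySem.Str.endswith s "}" then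
      (st.1, false, "")
    else st)
  else if pvBadTokens.any (fun tok => PySem.Str.isIn tok line) then st
  else (st.1 ++ [line], st.2.1, st.2.2)

def remove_known_bad_css (text : String) : String :=
  let lines := PySem.Str.splitlines text
  let st := lines.foldl pvAStep ([], false, "")
  PySem.Str.join "\n" st.1 ++ "\n"

-- ===== PORT B =====
def pvIsBlockStart (line : String) : Bool :=
  PySem.Str.isIn "{" line &&
    (PySem.Str.isIn "div[data-testid=\"stButton\"]" line || PySem.Str.isIn ".mdgo-strike" line)

def pvIsBlockEnd (s : String) : Bool :=
  PySem.Str.isIn "</style>" s || PySem.Str.endswith s "}"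

-- inner while loop: drop lines until (and including) the closing line
def pvSkipBlock : List String → List String
  | [] => []
  | l :: rest => if pvIsBlockEnd (PySem.Str.strip l) then rest else pvSkipBlock rest

-- the port of B cites this for termination of its outer loop
theorem pvSkipBlock_length_le (ls : List String) : (pvSkipBlock ls).length ≤ ls.length := by
  induction ls with
  | nil => simp [pvSkipBlock]
  | cons l rest ih =>
    simp only [pvSkipBlock]
    split
    · simp
    · exact le_trans ih (by simp)

-- outer while loop over the remaining lines
def pvAltLoop : List String → List String
  | [] => []
  | line :: rest =>
    if pvIsBlockStart line then pvAltLoop (pvSkipBlock rest)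
    else if pvBadTokens.any (fun tok => PySem.Str.isIn tok line) then pvAltLoop rest
    else line :: pvAltLoop rest
  termination_by ls => ls.length
  decreasing_by
  · exact Nat.lt_succ_of_le (pvSkipBlock_length_le rest)
  · simp
  · simp

def remove_known_bad_css_alt (text : String) : String :=
  PySem.Str.join "\n" (pvAltLoop (PySem.Str.splitlines text)) ++ "\n"

-- ===== PRECONDITION & SPEC =====
def Spec_remove_known_bad_css (text : String) (out : String) : Prop := out = remove_known_bad_css_alt text
instance (text : String) (out : String) : Decidable (Spec_remove_known_bad_css text out) := by unfold Spec_remove_known_bad_css; infer_instance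

-- ===== CLAIM (what is proved, stated in full; the proofs are below) =====
def Claim_equal_remove_known_bad_css : Prop := ∀ (text : String), Dom_remove_known_bad_css text → Spec_remove_known_bad_css text (remove_known_bad_css text)

-- ===== LEMMAS AND PROOFS =====

-- A's block-start test equals B's (Boolean distribution)
theorem pvStart_eq (line : String) :
    ((PySem.Str.isIn "div[data-testid=\"stButton\"]" line && PySem.Str.isIn "{" line)
      || (PySem.Str.isIn ".mdgo-strike" line && PySem.Str.isIn "{" line)) = pvIsBlockStart line := by
  unfold pvIsBlockStart
  cases PySem.Str.isIn "div[data-testid=\"stButton\"]" line <;>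
    cases PySem.Str.isIn "{" line <;>
    cases PySem.Str.isIn ".mdgo-strike" line <;> rfl

-- A's block-end test equals B's: "}" and "}}" both end with "}"
theorem pvEnd_eq (s : String) :
    ((s == "}") || (s == "}}") || PySem.Str.isIn "</style>" s || PySem.Str.endswith s "}")
      = pvIsBlockEnd s := by
  unfold pvIsBlockEnd
  by_cases h1 : s = "}"
  · subst h1; decide
  · by_cases h2 : s = "}}"
    · subst h2; decide
    · rw [beq_eq_false_iff_ne.mpr h1, beq_eq_false_iff_ne.mpr h2, Bool.false_or, Bool.false_or]

-- A's loop body in skip = false state, phrased with B's predicates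
theorem pvAStep_false (out : List String) (r l : String) :
    pvAStep (out, false, r) l =
      (if pvIsBlockStart l then (out, true, "css")
       else if pvBadTokens.any (fun tok => PySem.Str.isIn tok l) then (out, false, r)
       else (out ++ [l], false, r)) := by
  unfold pvAStep
  simp only [Bool.not_false, Bool.true_and, pvStart_eq, Bool.false_eq_true, reduceIte]

-- A's loop body in skip = true state, phrased with B's predicates
theorem pvAStep_true (out : List String) (r l : String) :
    pvAStep (out, true, r) l =
      (if pvIsBlockEnd (PySem.Str.strip l) then (out, false, "") else (out, true, r)) := by
  unfold pvAStep
  simp only [Bool.not_true, Bool.false_and, Bool.false_eq_true, reduceIte, pvEnd_eq]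

-- the fold with skip = false computes pvAltLoop; with skip = true it first runs pvSkipBlock
theorem pvFold_eq (ls : List String) : ∀ (out : List String) (r : String),
    (ls.foldl pvAStep (out, false, r)).1 = out ++ pvAltLoop ls ∧
    (ls.foldl pvAStep (out, true, r)).1 = out ++ pvAltLoop (pvSkipBlock ls) := by
  induction ls with
  | nil => intro out r; simp [pvAltLoop, pvSkipBlock]
  | cons l rest ih =>
    intro out r
    refine ⟨?_, ?_⟩
    · -- skip = false
      rw [List.foldl_cons, pvAStep_false, pvAltLoop]
      by_cases hs : pvIsBlockStart l = true
      · rw [if_pos hs, if_pos hs]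
        exact (ih out "css").2
      · rw [if_neg hs, if_neg hs]
        by_cases hb : pvBadTokens.any (fun tok => PySem.Str.isIn tok l) = true
        · rw [if_pos hb, if_pos hb]
          exact (ih out r).1
        · rw [if_neg hb, if_neg hb, (ih (out ++ [l]) r).1]
          simp
    · -- skip = true
      rw [List.foldl_cons, pvAStep_true, pvSkipBlock]
      by_cases he : pvIsBlockEnd (PySem.Str.strip l) = true
      · rw [if_pos he, if_pos he]
        exact (ih out "").1
      · rw [if_neg he, if_neg he]
        exact (ih out r).2

-- ===== VERDICT (by name: the statement is the Claim_ definition above) =====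
theorem remove_known_bad_css_spec : Claim_equal_remove_known_bad_css := by
  intro text _
  show PySem.Str.join "\n" (((PySem.Str.splitlines text).foldl pvAStep ([], false, "")).1) ++ "\n"
      = remove_known_bad_css_alt text
  rw [(pvFold_eq (PySem.Str.splitlines text) [] "").1]
  rfl
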